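-- pv_equiv track=rewrite | github.com/onerandomusername/ghretos | src/ghretos/parsing.py | _valid_repository
-- ===== SOURCE A (Python) =====
-- import string
--
-- def _valid_repository(repository: str) -> bool:
--     """Validates a GitHub Repository name according to GitHub's rules."""
--     if not (1 <= len(repository) <= 100):
--         return False
--     allowed_chars = string.ascii_letters + string.digits + "-._"
--
--     for char in repository:  # noqa: SIM110
--         if char not in allowed_chars:
--             return False
--
--     return True
-- ===== SOURCE B (Python) =====
-- import re
--
-- _REPO_RE = re.compile(r'[A-Za-z0-9._-]{1,100}')
--
-- def _valid_repository(repository: str) -> bool: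
--     """Validates a GitHub Repository name according to GitHub's rules."""
--     return bool(_REPO_RE.fullmatch(repository))
-- ===== Notes on version B (the rewrite author's own statement) =====
-- stated objective: idiomatic
-- what changed: Replaced the length guard plus per-character early-return loop over an allowed-characters string with a single precompiled regex fullmatch of [A-Za-z0-9._-]{1,100}, which enforces the length and character class in one pattern match.
import Mathlib
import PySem

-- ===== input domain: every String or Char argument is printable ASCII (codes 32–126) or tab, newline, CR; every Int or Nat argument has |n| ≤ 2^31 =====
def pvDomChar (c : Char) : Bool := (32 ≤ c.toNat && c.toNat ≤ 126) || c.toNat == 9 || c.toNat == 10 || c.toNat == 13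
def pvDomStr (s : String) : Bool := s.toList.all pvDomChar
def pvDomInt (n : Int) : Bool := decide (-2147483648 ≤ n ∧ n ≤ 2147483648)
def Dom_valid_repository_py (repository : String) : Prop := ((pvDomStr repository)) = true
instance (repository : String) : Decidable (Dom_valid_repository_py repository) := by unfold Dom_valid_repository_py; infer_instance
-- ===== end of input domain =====

-- B replaces A's length guard + per-character early-return loop over an allowed-chars string
-- by a single regex fullmatch of [A-Za-z0-9._-]{1,100} (idiomatic; return value only).

-- ===== PORT A =====
-- allowed_chars = string.ascii_letters + string.digits + "-._"
def pvAllowedChars : List Char :=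
  "abcdefghijklmnopqrstuvwxyzABCDEFGHIJKLMNOPQRSTUVWXYZ0123456789-._".toList

-- the 'for char in repository: if char not in allowed_chars: return False' loop
def pvLoopA : List Char → Bool
  | [] => true
  | c :: cs => if c ∈ pvAllowedChars then pvLoopA cs else false

def valid_repository_py (repository : String) : Bool :=
  if ¬ (1 ≤ repository.toList.length ∧ repository.toList.length ≤ 100) then false
  else pvLoopA repository.toList

-- ===== PORT B =====
-- The regex character class [A-Za-z0-9._-]: three codepoint ranges plus the literals '.', '_', '-'.
-- This is exactly re.fullmatch's semantics for that class (no regex engine in Lean; exact port of the pattern).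
def pvCharClass (c : Char) : Bool :=
  ('A' ≤ c && c ≤ 'Z') || ('a' ≤ c && c ≤ 'z') || ('0' ≤ c && c ≤ '9')
    || c == '.' || c == '_' || c == '-'

-- fullmatch of [A-Za-z0-9._-]{1,100}: every char is in the class and the count is in 1..100
def valid_repository_py_alt (repository : String) : Bool :=
  repository.toList.all pvCharClass
    && decide (1 ≤ repository.toList.length) && decide (repository.toList.length ≤ 100)

-- ===== PRECONDITION & SPEC =====
def Spec_valid_repository_py (repository : String) (out : Bool) : Prop := out = valid_repository_py_alt repository
instance (repository : String) (out : Bool) : Decidable (Spec_valid_repository_py repository out) := by unfold Spec_valid_repository_py; infer_instance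

-- ===== CLAIM (what is proved, stated in full; the proofs are below) =====
def Claim_equal_valid_repository_py : Prop := ∀ (repository : String), Dom_valid_repository_py repository → Spec_valid_repository_py repository (valid_repository_py repository)

-- ===== LEMMAS AND PROOFS =====

-- membership in A's allowed-chars string agrees with B's character class (checked for all codepoints < 128)
set_option maxRecDepth 10000 in
theorem pv_mem_iff_class_lt128 :
    ∀ n ∈ List.range 128,
      (decide (Char.ofNat n ∈ pvAllowedChars) = pvCharClass (Char.ofNat n)) := by
  decide

theorem pv_mem_iff_class (c : Char) (h : c.toNat < 128) :
    (decide (c ∈ pvAllowedChars) = pvCharClass c) := by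
  have := pv_mem_iff_class_lt128 c.toNat (List.mem_range.mpr h)
  simpa [Char.ofNat_toNat] using this

-- the early-return loop equals List.all of the class, for chars below 128
theorem pv_loopA_eq_all (l : List Char) (h : ∀ c ∈ l, c.toNat < 128) :
    pvLoopA l = l.all pvCharClass := by
  induction l with
  | nil => rfl
  | cons c cs ih =>
    have hc : (decide (c ∈ pvAllowedChars) = pvCharClass c) :=
      pv_mem_iff_class c (h c (by simp))
    simp only [pvLoopA, List.all_cons, ← hc]
    by_cases hmem : c ∈ pvAllowedChars
    · simp [hmem, ih (fun d hd => h d (List.mem_cons_of_mem _ hd))]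
    · simp [hmem]

-- ===== VERDICT (by name: the statement is the Claim_ definition above) =====
theorem valid_repository_py_spec : Claim_equal_valid_repository_py := by
  intro repository hdom
  unfold Spec_valid_repository_py valid_repository_py valid_repository_py_alt
  have hlt : ∀ c ∈ repository.toList, c.toNat < 128 := by
    intro c hc
    have := (List.all_eq_true.mp hdom) c hc
    simp [pvDomChar] at this
    omega
  have hL : repository.toList.length = repository.length := by simp
  rw [pv_loopA_eq_all _ hlt]
  by_cases h1 : 1 ≤ repository.length
  · by_cases h2 : repository.length ≤ 100
    · have h2' : ¬ 100 < repository.length := by omega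
      simp [hL, h1, h2, h2']
    · have h2' : 100 < repository.length := by omega
      simp [hL, h2, h2']
  · simp [hL, h1]
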